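-- pv_equiv track=rewrite | github.com/CiDong0418/Robot_Arm_and_my_system_for_sim | src/dabc_optimizer/src/dabc_optimizer/fitness.py | _choose_available_hand
-- ===== SOURCE A (Python) =====
-- def _choose_available_hand(allowed_hands, hand_holding, resource_clock, min_start):
--     candidates = []
--     for hand in allowed_hands:
--         if hand_holding.get(hand) is None:
--             ready_time = max(min_start, resource_clock.get(hand, 0))
--             candidates.append((ready_time, hand))
--     if not candidates:
--         return None
--     candidates.sort(key=lambda item: (item[0], item[1]))
--     return candidates[0][1]
-- ===== SOURCE B (Python) =====
-- def _choose_available_hand(allowed_hands, hand_holding, resource_clock, min_start):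
--     best = None
--     for hand in allowed_hands:
--         if hand_holding.get(hand) is None:
--             key = (max(min_start, resource_clock.get(hand, 0)), hand)
--             if best is None or key < best:
--                 best = key
--     return None if best is None else best[1]
-- ===== Notes on version B (the rewrite author's own statement) =====
-- stated objective: faster
-- what changed: single-pass running-minimum over (ready_time, hand) tuple keys replaces accumulating a candidate list and sorting it; the tuple key preserves the tie-break exactly
import Mathlib
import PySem

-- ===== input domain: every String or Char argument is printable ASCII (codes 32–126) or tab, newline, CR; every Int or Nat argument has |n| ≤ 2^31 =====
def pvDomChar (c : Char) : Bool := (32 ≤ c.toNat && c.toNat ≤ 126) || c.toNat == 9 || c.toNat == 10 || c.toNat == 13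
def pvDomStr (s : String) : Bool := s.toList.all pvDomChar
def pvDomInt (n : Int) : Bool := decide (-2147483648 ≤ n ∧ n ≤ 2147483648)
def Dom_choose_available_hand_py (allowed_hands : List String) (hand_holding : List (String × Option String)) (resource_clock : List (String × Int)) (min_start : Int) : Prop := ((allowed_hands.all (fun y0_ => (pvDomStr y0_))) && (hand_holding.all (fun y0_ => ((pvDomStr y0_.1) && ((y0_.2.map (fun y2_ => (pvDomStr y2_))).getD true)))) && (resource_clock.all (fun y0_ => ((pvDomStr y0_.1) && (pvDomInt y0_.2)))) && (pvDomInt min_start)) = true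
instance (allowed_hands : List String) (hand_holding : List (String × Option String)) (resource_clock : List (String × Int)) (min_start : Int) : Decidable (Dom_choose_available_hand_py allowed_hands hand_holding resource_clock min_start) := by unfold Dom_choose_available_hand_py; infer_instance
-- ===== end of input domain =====

-- B replaces A's collect-then-sort with a single-pass running minimum over (ready_time, hand) keys (O(n) vs O(n log n); measured faster in a timing run).

-- ===== PORT A =====
def choose_available_hand_py (allowed_hands : List String) (hand_holding : List (String × Option String)) (resource_clock : List (String × Int)) (min_start : Int) : Option String :=
  let candidates : List (Int × String) := allowed_hands.foldl
    (fun acc hand =>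
      if PySem.Dict.getD (PySem.Dict.mk hand_holding) hand none = none then
        acc ++ [(max min_start (PySem.Dict.getD (PySem.Dict.mk resource_clock) hand 0), hand)]
      else acc) []
  if candidates = [] then none
  else ((PySem.List.sorted2 candidates (fun it => it.1) (fun it => it.2)).head?).map (fun c => c.2)

-- ===== PORT B =====
def choose_available_hand_py_alt (allowed_hands : List String) (hand_holding : List (String × Option String)) (resource_clock : List (String × Int)) (min_start : Int) : Option String :=
  let best : Option (Int × String) := allowed_hands.foldl
    (fun best hand =>
      if PySem.Dict.getD (PySem.Dict.mk hand_holding) hand none = none then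
        let key : Int × String := (max min_start (PySem.Dict.getD (PySem.Dict.mk resource_clock) hand 0), hand)
        match best with
        | none => some key
        | some b => if key.1 < b.1 ∨ (key.1 = b.1 ∧ key.2 < b.2) then some key else some b
      else best) none
  best.map (fun b => b.2)

-- ===== PRECONDITION & SPEC =====
def Spec_choose_available_hand_py (allowed_hands : List String) (hand_holding : List (String × Option String)) (resource_clock : List (String × Int)) (min_start : Int) (out : Option String) : Prop := out = choose_available_hand_py_alt allowed_hands hand_holding resource_clock min_start
instance (allowed_hands : List String) (hand_holding : List (String × Option String)) (resource_clock : List (String × Int)) (min_start : Int) (out : Option String) : Decidable (Spec_choose_available_hand_py allowed_hands hand_holding resource_clock min_start out) := by unfold Spec_choose_available_hand_py; infer_instance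

-- ===== CLAIM (what is proved, stated in full; the proofs are below) =====
def Claim_equal_choose_available_hand_py : Prop := ∀ (allowed_hands : List String) (hand_holding : List (String × Option String)) (resource_clock : List (String × Int)) (min_start : Int), Dom_choose_available_hand_py allowed_hands hand_holding resource_clock min_start → Spec_choose_available_hand_py allowed_hands hand_holding resource_clock min_start (choose_available_hand_py allowed_hands hand_holding resource_clock min_start)

-- ===== LEMMAS AND PROOFS =====

-- head of an insertBy is the lt-minimum of the inserted element and the old head
theorem pv_head?_insertBy {α : Type} (lt : α → α → Bool) (x : α) (ys : List α) :
    (PySem.List.insertBy lt x ys).head? =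
      some (match ys.head? with | none => x | some y => if lt x y then x else y) := by
  cases ys with
  | nil => simp [PySem.List.insertBy]
  | cons y ys =>
    simp only [PySem.List.insertBy, List.head?_cons]
    split <;> simp_all

-- the head of the insertion-sort fold is the first-minimum fold
theorem pv_head?_foldl_insertBy {α : Type} (lt : α → α → Bool) (cs : List α) :
    ∀ acc : List α,
      (cs.foldl (fun a x => PySem.List.insertBy lt x a) acc).head? =
        cs.foldl (fun m x =>
          match m with
          | none => some x
          | some m => if lt x m then some x else some m) acc.head? := by
  induction cs with
  | nil => intro acc; rfl
  | cons c cs ih =>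
    intro acc
    rw [List.foldl_cons, List.foldl_cons, ih, pv_head?_insertBy]
    cases acc.head? with
    | none => rfl
    | some y => by_cases h : lt c y = true <;> simp [h]

-- Python's lexicographic tuple '<' equals sorted2's comparator on Int × String
theorem pv_pairlt_iff (k b : Int × String) :
    (k.1 < b.1 ∨ (k.1 = b.1 ∧ k.2 < b.2)) ↔
      (decide (k.1 < b.1) || !decide (b.1 < k.1) && decide (k.2 < b.2)) = true := by
  simp only [Bool.or_eq_true, decide_eq_true_eq, Bool.and_eq_true, Bool.not_eq_eq_eq_not,
    Bool.not_true, decide_eq_false_iff_not]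
  constructor
  · rintro (h | ⟨h1, h2⟩)
    · exact Or.inl h
    · exact Or.inr ⟨by omega, h2⟩
  · rintro (h | ⟨h1, h2⟩)
    · exact Or.inl h
    · rcases lt_trichotomy k.1 b.1 with h' | h' | h'
      · exact Or.inl h'
      · exact Or.inr ⟨h', h2⟩
      · exact absurd h' h1

theorem choose_available_hand_py_eq (allowed_hands : List String)
    (hand_holding : List (String × Option String)) (resource_clock : List (String × Int))
    (min_start : Int) :
    choose_available_hand_py allowed_hands hand_holding resource_clock min_start =
      choose_available_hand_py_alt allowed_hands hand_holding resource_clock min_start := by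
  unfold choose_available_hand_py choose_available_hand_py_alt
  set f : String → Int × String :=
    fun hand => (max min_start (PySem.Dict.getD (PySem.Dict.mk resource_clock) hand 0), hand) with hf
  set lt : Int × String → Int × String → Bool :=
    fun a b => decide (a.1 < b.1) || !decide (b.1 < a.1) && decide (a.2 < b.2) with hlt
  -- A's candidate loop is a filter-map
  rw [PySem.List.foldl_append_ite (p := fun hand => PySem.Dict.getD (PySem.Dict.mk hand_holding) hand none = none)
    (f := f)]
  -- B's loop runs over the same filtered list
  rw [PySem.List.foldl_ite_eq_foldl_filter
    (p := fun hand => PySem.Dict.getD (PySem.Dict.mk hand_holding) hand none = none)]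
  set F := allowed_hands.filter
    (fun hand => decide (PySem.Dict.getD (PySem.Dict.mk hand_holding) hand none = none)) with hF
  simp only [List.nil_append]
  by_cases hc : F.map f = []
  · rw [List.map_eq_nil_iff] at hc
    simp [hc]
  · rw [if_neg (by rw [List.map_eq_nil_iff]; intro h; exact hc (by rw [h]; simp))]
    have hs : PySem.List.sorted2 (F.map f) (fun it => it.1) (fun it => it.2) =
        (F.map f).foldl (fun acc x => PySem.List.insertBy lt x acc) [] := by
      simp [PySem.List.sorted2, hlt]
    rw [hs, pv_head?_foldl_insertBy, List.head?_nil, List.foldl_map]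
    congr 1
    apply PySem.List.foldl_congr_mem
    intro m hand _
    cases m with
    | none => rfl
    | some b =>
      simp only
      by_cases h : (f hand).1 < b.1 ∨ ((f hand).1 = b.1 ∧ (f hand).2 < b.2)
      · rw [if_pos ((pv_pairlt_iff (f hand) b).mp h), if_pos h]
      · rw [if_neg (fun hb => h ((pv_pairlt_iff (f hand) b).mpr hb)), if_neg h]

-- ===== VERDICT (by name: the statement is the Claim_ definition above) =====
theorem choose_available_hand_py_spec : Claim_equal_choose_available_hand_py := by
  intro allowed_hands hand_holding resource_clock min_start _
  exact choose_available_hand_py_eq allowed_hands hand_holding resource_clock min_start
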